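-- pv_equiv track=rewrite | github.com/Roml68/Temporal-segmentation-for-Peruvian-Sign-language | Diffact/files/utils.py | get_labels_start_end_time_for_masking
-- ===== SOURCE A (Python) =====
-- def get_labels_start_end_time_for_masking(frame_wise_labels, bg_class=["background"]):
--     labels = []
--     starts = []
--     ends = []
--     last_label = frame_wise_labels[0]
--     if frame_wise_labels[0] not in bg_class:
--         labels.append(frame_wise_labels[0])
--         starts.append(0)
--     for i in range(len(frame_wise_labels)):
--         if frame_wise_labels[i] != last_label:
--             if frame_wise_labels[i] not in bg_class:
--                 labels.append(frame_wise_labels[i])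
--                 starts.append(i)
--             if last_label not in bg_class:
--                 ends.append(i-1)
--             last_label = frame_wise_labels[i]
--     if last_label not in bg_class:
--         ends.append(i)
--     return labels, starts, ends
-- ===== SOURCE B (Python) =====
-- def get_labels_start_end_time_for_masking(frame_wise_labels, bg_class=["background"]):
--     fwl = frame_wise_labels
--     n = len(fwl)
--     labels = [x for i, x in enumerate(fwl)
--               if x not in bg_class and (i == 0 or fwl[i - 1] != x)]
--     starts = [i for i, x in enumerate(fwl)
--               if x not in bg_class and (i == 0 or fwl[i - 1] != x)]
--     ends = [i for i, x in enumerate(fwl)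
--             if x not in bg_class and (i == n - 1 or fwl[i + 1] != x)]
--     return labels, starts, ends
-- ===== Notes on version B (the rewrite author's own statement) =====
-- stated objective: alternative
-- what changed: Replaces A's single stateful pass (last_label tracking with interleaved appends to three lists) by three independent comprehensions over enumerate(fwl), each selecting frames by a local run-boundary predicate (label differs from predecessor for labels/starts, from successor for ends).
import Mathlib
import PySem

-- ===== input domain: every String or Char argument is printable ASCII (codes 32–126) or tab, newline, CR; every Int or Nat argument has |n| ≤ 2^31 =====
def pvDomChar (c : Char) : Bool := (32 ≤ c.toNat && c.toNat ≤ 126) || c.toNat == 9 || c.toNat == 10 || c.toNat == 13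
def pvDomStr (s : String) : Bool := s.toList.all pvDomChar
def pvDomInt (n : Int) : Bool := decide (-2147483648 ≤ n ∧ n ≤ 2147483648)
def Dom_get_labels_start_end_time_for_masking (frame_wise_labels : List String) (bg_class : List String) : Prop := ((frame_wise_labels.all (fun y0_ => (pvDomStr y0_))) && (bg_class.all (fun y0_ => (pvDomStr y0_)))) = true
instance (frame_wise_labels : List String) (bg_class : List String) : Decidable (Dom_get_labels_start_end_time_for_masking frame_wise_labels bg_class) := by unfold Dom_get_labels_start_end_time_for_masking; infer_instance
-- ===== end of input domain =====

-- B replaces A's stateful change-detection loop by three independent comprehensions over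
-- enumerate(fwl) with local run-boundary predicates (differs-from-predecessor / -successor);
-- objective: alternative (same cost, no threaded state).

-- ===== PORT A =====
-- loop body of A's `for i in range(len(frame_wise_labels))` (state = labels, starts, ends, last_label; p = (i, frame_wise_labels[i]))
def pvLoopBody (bg_class : List String)
    (s : List String × List Int × List Int × String) (p : Int × String) :
    List String × List Int × List Int × String :=
  if p.2 ≠ s.2.2.2 then
    ((if p.2 ∈ bg_class then s.1 else s.1 ++ [p.2]),
     (if p.2 ∈ bg_class then s.2.1 else s.2.1 ++ [p.1]),
     (if s.2.2.2 ∈ bg_class then s.2.2.1 else s.2.2.1 ++ [p.1 - 1]),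
     p.2)
  else s

-- A's final `if last_label not in bg_class: ends.append(i)` + return
def pvFin (bg_class : List String) (s : List String × List Int × List Int × String) (e : Int) :
    List String × List Int × List Int :=
  (s.1, s.2.1, if s.2.2.2 ∈ bg_class then s.2.2.1 else s.2.2.1 ++ [e])

def get_labels_start_end_time_for_masking (frame_wise_labels : List String) (bg_class : List String) : List String × List Int × List Int :=
  match frame_wise_labels with
  | [] => ([], [], [])   -- Python raises IndexError here (frame_wise_labels[0]); excluded by Pre_
  | f0 :: _ =>
    let labels : List String := if f0 ∈ bg_class then [] else [f0]
    let starts : List Int := if f0 ∈ bg_class then [] else [(0 : Int)]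
    let st := (PySem.List.pyRange 0 (frame_wise_labels.length : Int) 1).foldl
      (fun s i => pvLoopBody bg_class s (i, PySem.List.pyGetD frame_wise_labels i ""))
      (labels, starts, ([] : List Int), f0)
    pvFin bg_class st ((frame_wise_labels.length : Int) - 1)

-- ===== PORT B =====
-- B's comprehension filter `x not in bg_class and (i == 0 or fwl[i-1] != x)` (run start)
def pvIsRunStart (fwl : List String) (bg : List String) (p : Int × String) : Bool :=
  !(bg.contains p.2) && (p.1 == 0 || PySem.List.pyGetD fwl (p.1 - 1) "" != p.2)

-- B's comprehension filter `x not in bg_class and (i == n - 1 or fwl[i+1] != x)` (run end)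
def pvIsRunEnd (fwl : List String) (bg : List String) (n : Int) (p : Int × String) : Bool :=
  !(bg.contains p.2) && (p.1 == n - 1 || PySem.List.pyGetD fwl (p.1 + 1) "" != p.2)

def get_labels_start_end_time_for_masking_alt (frame_wise_labels : List String) (bg_class : List String) : List String × List Int × List Int :=
  let n : Int := frame_wise_labels.length
  let labels := ((PySem.List.enumerate frame_wise_labels 0).filter
      (pvIsRunStart frame_wise_labels bg_class)).map (fun p => p.2)
  let starts := ((PySem.List.enumerate frame_wise_labels 0).filter
      (pvIsRunStart frame_wise_labels bg_class)).map (fun p => p.1)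
  let ends := ((PySem.List.enumerate frame_wise_labels 0).filter
      (pvIsRunEnd frame_wise_labels bg_class n)).map (fun p => p.1)
  (labels, starts, ends)

-- ===== PRECONDITION & SPEC =====
-- Pre_ excludes only the empty list, on which A raises IndexError (frame_wise_labels[0]).
def Pre_get_labels_start_end_time_for_masking (frame_wise_labels : List String) (bg_class : List String) : Prop :=
  frame_wise_labels ≠ []
instance (frame_wise_labels : List String) (bg_class : List String) : Decidable (Pre_get_labels_start_end_time_for_masking frame_wise_labels bg_class) := by unfold Pre_get_labels_start_end_time_for_masking; infer_instance

def pvWitness_get_labels_start_end_time_for_masking : List String × List String := (["walk", "background", "run"], ["background"])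

def Spec_get_labels_start_end_time_for_masking (frame_wise_labels : List String) (bg_class : List String) (out : List String × List Int × List Int) : Prop := out = get_labels_start_end_time_for_masking_alt frame_wise_labels bg_class
instance (frame_wise_labels : List String) (bg_class : List String) (out : List String × List Int × List Int) : Decidable (Spec_get_labels_start_end_time_for_masking frame_wise_labels bg_class out) := by unfold Spec_get_labels_start_end_time_for_masking; infer_instance

-- ===== CLAIM (what is proved, stated in full; the proofs are below) =====
def Claim_equal_get_labels_start_end_time_for_masking : Prop := ∀ (frame_wise_labels : List String) (bg_class : List String), Dom_get_labels_start_end_time_for_masking frame_wise_labels bg_class → Pre_get_labels_start_end_time_for_masking frame_wise_labels bg_class → Spec_get_labels_start_end_time_for_masking frame_wise_labels bg_class (get_labels_start_end_time_for_masking frame_wise_labels bg_class)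

-- ===== LEMMAS AND PROOFS =====

-- run-start pairs of a suffix, knowing the previous element is `last` (proof-side only)
def pvP (bg : List String) (last : String) (i : Int) : List String → List (Int × String)
  | [] => []
  | x :: xs => (if x ≠ last ∧ x ∉ bg then [(i, x)] else []) ++ pvP bg x (i + 1) xs

-- end indices as A produces them: open run labelled `last` occupies up to position i-1
def pvE (bg : List String) (last : String) (i : Int) : List String → List Int
  | [] => if last ∈ bg then [] else [i - 1]
  | x :: xs => (if x ≠ last ∧ last ∉ bg then [i - 1] else []) ++ pvE bg x (i + 1) xs

-- end indices by lookahead: position i holds the first listed element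
def pvE2 (bg : List String) (i : Int) : List String → List Int
  | [] => []
  | [x] => if x ∈ bg then [] else [i]
  | x :: y :: xs => (if y ≠ x ∧ x ∉ bg then [i] else []) ++ pvE2 bg (i + 1) (y :: xs)

theorem pvKey2 (bg : List String) (xs : List String) (i : Int) (last : String)
    (ls : List String) (ss es : List Int) :
    pvFin bg ((PySem.List.enumerate xs i).foldl (pvLoopBody bg) (ls, ss, es, last))
        (i + (xs.length : Int) - 1) =
      (ls ++ (pvP bg last i xs).map (fun p => p.2),
       ss ++ (pvP bg last i xs).map (fun p => p.1),
       es ++ pvE bg last i xs) := by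
  induction xs generalizing i last ls ss es with
  | nil =>
    by_cases h : last ∈ bg <;>
      simp [pvFin, pvP, pvE, PySem.List.enumerate_nil, h]
  | cons x xs' ih =>
    rw [PySem.List.enumerate_cons]
    have hlen : i + ((x :: xs').length : Int) - 1 = (i + 1) + ((xs').length : Int) - 1 := by
      push_cast [List.length_cons]; ring
    by_cases hx : x = last
    · subst hx
      have hstep : pvLoopBody bg (ls, ss, es, x) (i, x) = (ls, ss, es, x) := by
        simp [pvLoopBody]
      simp only [List.foldl_cons, hstep, hlen, ih]
      simp [pvP, pvE]
    · have hstep : pvLoopBody bg (ls, ss, es, last) (i, x) =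
          ((if x ∈ bg then ls else ls ++ [x]),
           (if x ∈ bg then ss else ss ++ [i]),
           (if last ∈ bg then es else es ++ [i - 1]), x) := by
        simp [pvLoopBody, hx]
      simp only [List.foldl_cons, hstep, hlen, ih]
      by_cases hxbg : x ∈ bg <;> by_cases hlbg : last ∈ bg <;>
        simp [pvP, pvE, hx, hxbg, hlbg]

theorem pvE_eq_pvE2 (bg : List String) (xs : List String) (x : String) (i : Int) :
    pvE bg x (i + 1) xs = pvE2 bg i (x :: xs) := by
  induction xs generalizing x i with
  | nil => simp [pvE, pvE2]
  | cons y ys ih =>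
    show (if y ≠ x ∧ x ∉ bg then [i + 1 - 1] else []) ++ pvE bg y (i + 1 + 1) ys = _
    rw [ih y (i + 1)]
    simp [pvE2, add_sub_cancel_right]

-- B's start filter over the suffix after prefix `pre ++ [last]` is exactly pvP
theorem pvBstart (bg : List String) (suf : List String) (pre : List String) (last : String) :
    (PySem.List.enumerate suf ((pre.length : Int) + 1)).filter
        (pvIsRunStart (pre ++ last :: suf) bg) =
      pvP bg last ((pre.length : Int) + 1) suf := by
  induction suf generalizing pre last with
  | nil => simp [PySem.List.enumerate_nil, pvP]
  | cons x xs ih =>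
    rw [PySem.List.enumerate_cons, List.filter_cons]
    have hz : (((pre.length : Int) + 1) == 0) = false := by
      simp; omega
    have hget : PySem.List.pyGetD (pre ++ last :: (x :: xs)) ((pre.length : Int) + 1 - 1) ""
        = last := by
      rw [show (pre.length : Int) + 1 - 1 = ((pre.length : Nat) : Int) from by ring]
      simp [PySem.List.pyGetD_natCast, List.getD_eq_getElem?_getD, List.getElem?_append_right]
    have htail : (PySem.List.enumerate xs ((pre.length : Int) + 1 + 1)).filter
        (pvIsRunStart (pre ++ last :: (x :: xs)) bg) = pvP bg x ((pre.length : Int) + 1 + 1) xs := by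
      have := ih (pre ++ [last]) x
      simpa [List.append_assoc, List.length_append, Nat.cast_add, add_assoc] using this
    have hcond : pvIsRunStart (pre ++ last :: (x :: xs)) bg ((pre.length : Int) + 1, x)
        = (!(bg.contains x) && (last != x)) := by
      simp only [pvIsRunStart, hz, hget]
      simp
    rw [hcond, htail]
    by_cases hb : x ∈ bg
    · simp [pvP, hb]
    · by_cases hne : x = last
      · subst hne; simp [pvP, hb]
      · have hne' : ¬ last = x := fun h => hne h.symm
        simp [pvP, hb, hne, hne']

-- B's end filter is exactly pvE2
theorem pvBend (bg : List String) (suf : List String) (pre : List String) (x : String) :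
    ((PySem.List.enumerate (x :: suf) (pre.length : Int)).filter
        (pvIsRunEnd (pre ++ x :: suf) bg ((pre ++ x :: suf).length : Int))).map (fun p => p.1) =
      pvE2 bg (pre.length : Int) (x :: suf) := by
  induction suf generalizing pre x with
  | nil =>
    have hlast : ((pre.length : Int) == ((pre ++ [x]).length : Int) - 1) = true := by
      simp [List.length_append]
    rw [PySem.List.enumerate_cons, PySem.List.enumerate_nil, List.filter_cons]
    by_cases hb : x ∈ bg <;> simp [pvIsRunEnd, pvE2, hlast, hb]
  | cons y ys ih =>
    have hn : (((pre.length : Int)) == ((pre ++ x :: y :: ys).length : Int) - 1) = false := by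
      simp [List.length_append]; omega
    have hget : PySem.List.pyGetD (pre ++ x :: y :: ys) ((pre.length : Int) + 1) "" = y := by
      have h1 : (pre.length : Int) + 1 = (((pre.length + 1 : Nat)) : Int) := by push_cast; ring
      rw [h1, PySem.List.pyGetD_natCast, List.getD_eq_getElem?_getD,
        List.getElem?_append_right (by omega)]
      simp
    have htail : ((PySem.List.enumerate (y :: ys) ((pre.length : Int) + 1)).filter
        (pvIsRunEnd (pre ++ x :: y :: ys) bg ((pre ++ x :: y :: ys).length : Int))).map (fun p => p.1)
        = pvE2 bg ((pre.length : Int) + 1) (y :: ys) := by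
      have := ih (pre ++ [x]) y
      simpa [List.append_assoc, List.length_append, Nat.cast_add] using this
    rw [PySem.List.enumerate_cons, List.filter_cons]
    have hcond : pvIsRunEnd (pre ++ x :: y :: ys) bg ((pre ++ x :: y :: ys).length : Int)
        ((pre.length : Int), x) = (!(bg.contains x) && (y != x)) := by
      simp only [pvIsRunEnd, hn, hget]
      simp
    rw [hcond, show pvE2 bg (pre.length : Int) (x :: y :: ys)
        = (if y ≠ x ∧ x ∉ bg then [(pre.length : Int)] else [])
          ++ pvE2 bg ((pre.length : Int) + 1) (y :: ys) from rfl, ← htail]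
    by_cases hb : x ∈ bg
    · have hc : (!bg.contains x && (y != x)) = false := by simp [hb]
      rw [hc, if_neg (by simp), if_neg (by simp [hb])]
      simp
    · by_cases hne : y = x
      · have hc : (!bg.contains x && (y != x)) = false := by simp [hne]
        rw [hc, if_neg (by simp), if_neg (by simp [hne])]
        simp
      · have hc : (!bg.contains x && (y != x)) = true := by simp [hb, hne]
        rw [hc, if_pos (by simp), if_pos ⟨hne, hb⟩]
        simp

-- ===== VERDICT (by name: the statement is the Claim_ definition above) =====
theorem get_labels_start_end_time_for_masking_spec : Claim_equal_get_labels_start_end_time_for_masking := by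
  intro fwl bg _ hpre
  unfold Spec_get_labels_start_end_time_for_masking
  match fwl, hpre with
  | f0 :: tl, _ =>
    simp only [get_labels_start_end_time_for_masking, get_labels_start_end_time_for_masking_alt]
    -- A side: fold over pyRange = fold over enumerate, then pvKey2
    have hbridge : PySem.List.enumerate (f0 :: tl) 0 =
        (PySem.List.pyRange 0 (((f0 :: tl).length : Int)) 1).map
          (fun j => (j, PySem.List.pyGetD (f0 :: tl) j "")) := by
      simpa using PySem.List.enumerate_eq_map_pyRange (xs := f0 :: tl) (d := "")
    have hfold : ((PySem.List.pyRange 0 (((f0 :: tl).length : Int)) 1).foldl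
          (fun s i => pvLoopBody bg s (i, PySem.List.pyGetD (f0 :: tl) i ""))
          ((if f0 ∈ bg then [] else [f0]), (if f0 ∈ bg then [] else [(0 : Int)]), ([] : List Int), f0))
        = (PySem.List.enumerate (f0 :: tl) 0).foldl (pvLoopBody bg)
          ((if f0 ∈ bg then [] else [f0]), (if f0 ∈ bg then [] else [(0 : Int)]), ([] : List Int), f0) := by
      rw [hbridge, List.foldl_map]
    rw [hfold, show (((f0 :: tl).length : Int)) - 1 = 0 + (((f0 :: tl).length : Int)) - 1 from by ring,
      pvKey2 bg (f0 :: tl) 0 f0]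
    -- B side: split off index 0 and use pvBstart / pvBend with pre = []
    have hstart : (PySem.List.enumerate (f0 :: tl) 0).filter (pvIsRunStart (f0 :: tl) bg)
        = (if f0 ∈ bg then [] else [((0 : Int), f0)]) ++ pvP bg f0 (0 + 1) tl := by
      rw [PySem.List.enumerate_cons, List.filter_cons]
      have h0 : pvIsRunStart (f0 :: tl) bg (0, f0) = !(bg.contains f0) := by
        simp [pvIsRunStart]
      have hB := pvBstart bg tl [] f0
      simp only [List.length_nil, Nat.cast_zero, List.nil_append] at hB
      rw [h0, hB]
      by_cases hb : f0 ∈ bg <;> simp [hb]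
    have hend : ((PySem.List.enumerate (f0 :: tl) 0).filter
          (pvIsRunEnd (f0 :: tl) bg (((f0 :: tl).length : Int)))).map (fun p => p.1)
        = pvE2 bg 0 (f0 :: tl) := by
      have := pvBend bg tl [] f0
      simpa using this
    rw [hstart, hend]
    -- align the three components
    have hP : pvP bg f0 0 (f0 :: tl) = pvP bg f0 (0 + 1) tl := by
      simp [pvP]
    have hEnds : pvE bg f0 0 (f0 :: tl) = pvE2 bg 0 (f0 :: tl) := by
      show (if f0 ≠ f0 ∧ f0 ∉ bg then [(0 : Int) - 1] else []) ++ pvE bg f0 (0 + 1) tl = _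
      rw [pvE_eq_pvE2 bg tl f0 0]
      simp
    rw [hP, hEnds]
    by_cases hb : f0 ∈ bg <;> simp [hb]
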